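-- pv_equiv track=rewrite | github.com/masthom/Music-History-Knowledge-Graph | MergeJasonToTtl8.py | ensure_correct_punctuation
-- ===== SOURCE A (Python) =====
-- def ensure_correct_punctuation(lines):
--     """Stellt korrekte TTL-Zeichensetzung sicher"""
--     if not lines:
--         return lines
--
--     # Finde die letzte nicht-Kommentar, nicht-leere Zeile
--     last_content_idx = -1
--     for i in range(len(lines)-1, -1, -1):
--         stripped = lines[i].strip()
--         if stripped and not stripped.startswith('#') and stripped != '.':
--             last_content_idx = i
--             break
--
--     if last_content_idx == -1:
--         return lines
--
--     result = []
--     for i, line in enumerate(lines):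
--         stripped = line.strip()
--
--         # Leere Zeilen und Kommentare unverändert übernehmen
--         if not stripped or stripped.startswith('#'):
--             result.append(line)
--             continue
--
--         # Wenn es die letzte Inhaltszeile ist, muss sie mit . enden
--         if i == last_content_idx:
--             # Entferne vorhandene Semikolons oder Punkte am Ende
--             clean_line = line.rstrip().rstrip(';').rstrip('.')
--             result.append(clean_line + ' .')
--         else:
--             # Normale Property-Zeilen müssen mit ; enden (wenn nicht schon vorhanden)
--             if not stripped.endswith(';') and not stripped.endswith(',') and not stripped.endswith('.'):
--                 result.append(line.rstrip() + ' ;')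
--             else:
--                 result.append(line)
--
--     return result
-- ===== SOURCE B (Python) =====
-- def ensure_correct_punctuation(lines):
--     """Stellt korrekte TTL-Zeichensetzung sicher (single reverse pass)"""
--     if not lines:
--         return lines
--
--     out = []
--     found_last = False
--     for line in reversed(lines):
--         stripped = line.strip()
--         if not stripped or stripped.startswith('#'):
--             out.append(line)
--         elif not found_last and stripped != '.':
--             out.append(line.rstrip().rstrip(';').rstrip('.') + ' .')
--             found_last = True
--         elif not stripped.endswith(';') and not stripped.endswith(',') and not stripped.endswith('.'):
--             out.append(line.rstrip() + ' ;')
--         else: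
--             out.append(line)
--
--     if not found_last:
--         return lines
--     out.reverse()
--     return out
-- ===== Notes on version B (the rewrite author's own statement) =====
-- stated objective: alternative
-- what changed: Replaces A's two passes (a reverse index search for the last content line, then a forward enumerate pass comparing every index against it) with a single reverse pass carrying a found_last flag, fixing the last content line the moment it is seen, with no index bookkeeping.
import Mathlib
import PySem

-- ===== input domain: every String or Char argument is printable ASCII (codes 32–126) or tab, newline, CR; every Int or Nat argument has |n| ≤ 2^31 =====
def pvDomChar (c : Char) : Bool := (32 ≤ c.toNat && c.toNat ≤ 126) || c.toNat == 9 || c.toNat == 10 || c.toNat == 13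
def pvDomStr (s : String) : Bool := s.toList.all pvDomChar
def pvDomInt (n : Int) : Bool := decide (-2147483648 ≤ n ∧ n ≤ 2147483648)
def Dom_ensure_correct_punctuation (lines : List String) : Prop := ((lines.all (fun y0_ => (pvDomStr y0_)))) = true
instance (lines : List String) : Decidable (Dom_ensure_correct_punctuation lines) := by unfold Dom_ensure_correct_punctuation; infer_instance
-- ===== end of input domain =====

-- B replaces A's two passes (reverse index search for the last content line, then a forward
-- enumerate pass compared against that index) with a single reverse pass carrying a found_last flag.

-- exact port of Python's 'a + b' on str (kernel-transparent, avoids opaque String.append)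
def pvConcat (a b : String) : String := String.ofList (a.toList ++ b.toList)
-- exact port of s.rstrip(c) for a ONE-character chars argument: drop trailing copies of c
def pvRstrip1 (s : String) (c : Char) : String := String.ofList ((s.toList.reverse.dropWhile (· == c)).reverse)

-- ===== PORT A =====
-- the 'for i in range(len(lines)-1, -1, -1): … break' search loop of A
def pvFindLoop (lines : List String) : List Int → Int
  | [] => -1
  | i :: rest =>
    let stripped := PySem.Str.strip ((PySem.List.pyGet? lines i).getD "")
    if stripped ≠ "" ∧ PySem.Str.startswith stripped "#" = false ∧ stripped ≠ "." then i
    else pvFindLoop lines rest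

def ensure_correct_punctuation (lines : List String) : List String :=
  if lines = [] then lines else
  let lastIdx := pvFindLoop lines (PySem.List.pyRange ((lines.length : Int) - 1) (-1) (-1))
  if lastIdx = -1 then lines else
  (PySem.List.enumerate lines).foldl (fun result p =>
      let line := p.2
      let stripped := PySem.Str.strip line
      if stripped = "" ∨ PySem.Str.startswith stripped "#" = true then result ++ [line]
      else if p.1 = lastIdx then
        result ++ [pvConcat (pvRstrip1 (pvRstrip1 (PySem.Str.rstrip line) ';') '.') " ."]
      else if PySem.Str.endswith stripped ";" = false ∧ PySem.Str.endswith stripped "," = false ∧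
              PySem.Str.endswith stripped "." = false then
        result ++ [pvConcat (PySem.Str.rstrip line) " ;"]
      else result ++ [line]) []

-- ===== PORT B =====
def ensure_correct_punctuation_alt (lines : List String) : List String :=
  if lines = [] then lines else
  let r := lines.reverse.foldl (fun (acc : List String × Bool) line =>
      let stripped := PySem.Str.strip line
      if stripped = "" ∨ PySem.Str.startswith stripped "#" = true then (acc.1 ++ [line], acc.2)
      else if acc.2 = false ∧ stripped ≠ "." then
        (acc.1 ++ [pvConcat (pvRstrip1 (pvRstrip1 (PySem.Str.rstrip line) ';') '.') " ."], true)
      else if PySem.Str.endswith stripped ";" = false ∧ PySem.Str.endswith stripped "," = false ∧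
              PySem.Str.endswith stripped "." = false then
        (acc.1 ++ [pvConcat (PySem.Str.rstrip line) " ;"], acc.2)
      else (acc.1 ++ [line], acc.2)) ([], false)
  if r.2 = false then lines else r.1.reverse

-- ===== PRECONDITION & SPEC =====
def Spec_ensure_correct_punctuation (lines : List String) (out : List String) : Prop := out = ensure_correct_punctuation_alt lines
instance (lines : List String) (out : List String) : Decidable (Spec_ensure_correct_punctuation lines out) := by unfold Spec_ensure_correct_punctuation; infer_instance

-- ===== CLAIM (what is proved, stated in full; the proofs are below) =====
def Claim_equal_ensure_correct_punctuation : Prop := ∀ (lines : List String), Dom_ensure_correct_punctuation lines → Spec_ensure_correct_punctuation lines (ensure_correct_punctuation lines)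

-- ===== LEMMAS AND PROOFS =====

-- one line is "content" iff its strip is nonempty, not a comment and not a bare '.'
def pvContent (line : String) : Prop :=
  PySem.Str.strip line ≠ "" ∧ PySem.Str.startswith (PySem.Str.strip line) "#" = false ∧
  PySem.Str.strip line ≠ "."

def pvFix (line : String) : String :=
  pvConcat (pvRstrip1 (pvRstrip1 (PySem.Str.rstrip line) ';') '.') " ."

def pvSemi (line : String) : String := pvConcat (PySem.Str.rstrip line) " ;"

-- the rule applied to every non-last line
def pvNorm (line : String) : String :=
  let stripped := PySem.Str.strip line
  if stripped = "" ∨ PySem.Str.startswith stripped "#" = true then line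
  else if PySem.Str.endswith stripped ";" = false ∧ PySem.Str.endswith stripped "," = false ∧
          PySem.Str.endswith stripped "." = false then pvSemi line
  else line

-- the per-element function of A's forward pass, with the last-content index idx
def pvGA (idx : Int) (p : Int × String) : String :=
  let stripped := PySem.Str.strip p.2
  if stripped = "" ∨ PySem.Str.startswith stripped "#" = true then p.2
  else if p.1 = idx then pvFix p.2
  else if PySem.Str.endswith stripped ";" = false ∧ PySem.Str.endswith stripped "," = false ∧
          PySem.Str.endswith stripped "." = false then pvSemi p.2
  else p.2

-- one step of B's reverse pass: the emitted line and the new found_last flag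
def pvStep (found : Bool) (line : String) : String × Bool :=
  let stripped := PySem.Str.strip line
  if stripped = "" ∨ PySem.Str.startswith stripped "#" = true then (line, found)
  else if found = false ∧ stripped ≠ "." then (pvFix line, true)
  else if PySem.Str.endswith stripped ";" = false ∧ PySem.Str.endswith stripped "," = false ∧
          PySem.Str.endswith stripped "." = false then (pvSemi line, found)
  else (line, found)

def pvEmit : List String → Bool → List String
  | [], _ => []
  | x :: r, f => (pvStep f x).1 :: pvEmit r (pvStep f x).2

def pvFound : List String → Bool → Bool
  | [], f => f
  | x :: r, f => pvFound r (pvStep f x).2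

lemma pvStep_true (line : String) : pvStep true line = (pvNorm line, true) := by
  simp only [pvStep, pvNorm]; split_ifs <;> simp_all

lemma pvStep_content (line : String) (h : pvContent line) : pvStep false line = (pvFix line, true) := by
  simp only [pvStep]; unfold pvContent at h; split_ifs <;> simp_all

lemma pvStep_noncontent (line : String) (h : ¬ pvContent line) : pvStep false line = (line, false) := by
  simp only [pvStep]; unfold pvContent at h; split_ifs <;> simp_all [(by decide : PySem.Chars.endswith ['.'] ['.'] = true)]

lemma pvGA_ne (idx : Int) (p : Int × String) (h : p.1 ≠ idx) : pvGA idx p = pvNorm p.2 := by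
  simp only [pvGA, pvNorm]; split_ifs <;> simp_all

lemma pvGA_eq (idx : Int) (line : String) (h : pvContent line) : pvGA idx (idx, line) = pvFix line := by
  simp only [pvGA]; unfold pvContent at h; split_ifs <;> simp_all

lemma pvNorm_noncontent (line : String) (h : ¬ pvContent line) : pvNorm line = line := by
  simp only [pvNorm]; unfold pvContent at h; split_ifs <;> simp_all [(by decide : PySem.Chars.endswith ['.'] ['.'] = true)]

lemma pvEmit_true (l : List String) : pvEmit l true = l.map pvNorm := by
  induction l with
  | nil => rfl
  | cons x r ih => simp [pvEmit, pvStep_true, ih]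

lemma pvFound_true (l : List String) : pvFound l true = true := by
  induction l with
  | nil => rfl
  | cons x r ih => simp [pvFound, pvStep_true, ih]

lemma pvFound_false_iff (l : List String) : pvFound l false = false ↔ ∀ x ∈ l, ¬ pvContent x := by
  induction l with
  | nil => simp [pvFound]
  | cons x r ih =>
    by_cases hx : pvContent x
    · simp only [pvFound, pvStep_content x hx, pvFound_true]
      simp only [List.forall_mem_cons]
      constructor
      · intro h; exact absurd h (by simp)
      · intro h; exact absurd hx h.1
    · simp only [pvFound, pvStep_noncontent x hx, List.forall_mem_cons, ih]
      simp [hx]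

-- B's foldl computes (out ++ emitted, final flag)
lemma pvB_foldl (l : List String) (out : List String) (f : Bool) :
    l.foldl (fun (acc : List String × Bool) line =>
      let stripped := PySem.Str.strip line
      if stripped = "" ∨ PySem.Str.startswith stripped "#" = true then (acc.1 ++ [line], acc.2)
      else if acc.2 = false ∧ stripped ≠ "." then
        (acc.1 ++ [pvConcat (pvRstrip1 (pvRstrip1 (PySem.Str.rstrip line) ';') '.') " ."], true)
      else if PySem.Str.endswith stripped ";" = false ∧ PySem.Str.endswith stripped "," = false ∧
              PySem.Str.endswith stripped "." = false then
        (acc.1 ++ [pvConcat (PySem.Str.rstrip line) " ;"], acc.2)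
      else (acc.1 ++ [line], acc.2)) (out, f) = (out ++ pvEmit l f, pvFound l f) := by
  induction l generalizing out f with
  | nil => simp [pvEmit, pvFound]
  | cons x r ih =>
    rw [List.foldl_cons]
    have hstep : (let stripped := PySem.Str.strip x;
      if stripped = "" ∨ PySem.Str.startswith stripped "#" = true then (out ++ [x], f)
      else if f = false ∧ stripped ≠ "." then
        (out ++ [pvConcat (pvRstrip1 (pvRstrip1 (PySem.Str.rstrip x) ';') '.') " ."], true)
      else if PySem.Str.endswith stripped ";" = false ∧ PySem.Str.endswith stripped "," = false ∧
              PySem.Str.endswith stripped "." = false then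
        (out ++ [pvConcat (PySem.Str.rstrip x) " ;"], f)
      else (out ++ [x], f)) = (out ++ [(pvStep f x).1], (pvStep f x).2) := by
      simp only [pvStep]; split_ifs <;> rfl
    rw [hstep, ih]
    simp [pvEmit, pvFound]

lemma pvB_unfold (lines : List String) (h : lines ≠ []) :
    ensure_correct_punctuation_alt lines =
      if pvFound lines.reverse false = false then lines else (pvEmit lines.reverse false).reverse := by
  unfold ensure_correct_punctuation_alt
  rw [if_neg h, pvB_foldl]
  simp

-- A's forward foldl is a map of pvGA over the enumeration
lemma pvA_foldl (l : List (Int × String)) (init : List String) (idx : Int) :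
    l.foldl (fun result p =>
      let line := p.2
      let stripped := PySem.Str.strip line
      if stripped = "" ∨ PySem.Str.startswith stripped "#" = true then result ++ [line]
      else if p.1 = idx then
        result ++ [pvConcat (pvRstrip1 (pvRstrip1 (PySem.Str.rstrip line) ';') '.') " ."]
      else if PySem.Str.endswith stripped ";" = false ∧ PySem.Str.endswith stripped "," = false ∧
              PySem.Str.endswith stripped "." = false then
        result ++ [pvConcat (PySem.Str.rstrip line) " ;"]
      else result ++ [line]) init = init ++ l.map (pvGA idx) := by
  have hfun : (fun (result : List String) (p : Int × String) =>
      let line := p.2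
      let stripped := PySem.Str.strip line
      if stripped = "" ∨ PySem.Str.startswith stripped "#" = true then result ++ [line]
      else if p.1 = idx then
        result ++ [pvConcat (pvRstrip1 (pvRstrip1 (PySem.Str.rstrip line) ';') '.') " ."]
      else if PySem.Str.endswith stripped ";" = false ∧ PySem.Str.endswith stripped "," = false ∧
              PySem.Str.endswith stripped "." = false then
        result ++ [pvConcat (PySem.Str.rstrip line) " ;"]
      else result ++ [line]) = fun result p => result ++ [pvGA idx p] := by
    funext result p
    simp only [pvGA]; split_ifs <;> rfl
  rw [hfun, PySem.List.foldl_append_singleton_eq_map]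

lemma pvMap_pvGA (xs : List String) (s idx : Int) (h : ∀ i : Int, s ≤ i → i < s + xs.length → i ≠ idx) :
    (PySem.List.enumerate xs s).map (pvGA idx) = xs.map pvNorm := by
  induction xs generalizing s with
  | nil => simp [PySem.List.enumerate_nil]
  | cons x r ih =>
    rw [PySem.List.enumerate_cons, List.map_cons, List.map_cons]
    have hs : s ≠ idx := h s le_rfl (by simp only [List.length_cons]; push_cast; omega)
    rw [pvGA_ne idx (s, x) hs]
    rw [ih (s + 1) (by
      intro i h1 h2
      exact h i (by omega) (by simp only [List.length_cons] at h2 ⊢; push_cast at h2 ⊢; omega))]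

lemma pvFindLoop_mem (lines : List String) (idxs : List Int) :
    pvFindLoop lines idxs = -1 ∨ pvFindLoop lines idxs ∈ idxs := by
  induction idxs with
  | nil => left; rfl
  | cons i rest ih =>
    simp only [pvFindLoop]
    split_ifs
    · right; exact List.mem_cons_self
    · rcases ih with h | h
      · left; exact h
      · right; exact List.mem_cons_of_mem _ h

lemma pvFindLoop_restrict (xs : List String) (y : String) (idxs : List Int)
    (h : ∀ i ∈ idxs, 0 ≤ i ∧ i < (xs.length : Int)) :
    pvFindLoop (xs ++ [y]) idxs = pvFindLoop xs idxs := by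
  induction idxs with
  | nil => rfl
  | cons i rest ih =>
    obtain ⟨h0, hlt⟩ := h i List.mem_cons_self
    have hget : PySem.List.pyGet? (xs ++ [y]) i = PySem.List.pyGet? xs i := by
      rw [PySem.List.pyGet?_of_nonneg _ h0, PySem.List.pyGet?_of_nonneg _ h0]
      rw [List.getElem?_append_left (by omega)]
    simp only [pvFindLoop, hget]
    split_ifs
    · rfl
    · exact ih (fun j hj => h j (List.mem_cons_of_mem _ hj))

lemma pvFindLoop_concat_content (xs : List String) (y : String) (hy : pvContent y) :
    pvFindLoop (xs ++ [y]) (PySem.List.pyRange (((xs ++ [y]).length : Int) - 1) (-1) (-1)) =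
      (xs.length : Int) := by
  have hlen : (((xs ++ [y]).length : Int)) - 1 = (xs.length : Int) := by
    simp [List.length_append]
  rw [hlen, PySem.List.pyRange_neg_one_cons (by omega)]
  simp only [pvFindLoop, PySem.List.pyGet?_append_length]
  rw [if_pos]
  exact hy

lemma pvFindLoop_concat_noncontent (xs : List String) (y : String) (hy : ¬ pvContent y) :
    pvFindLoop (xs ++ [y]) (PySem.List.pyRange (((xs ++ [y]).length : Int) - 1) (-1) (-1)) =
      pvFindLoop xs (PySem.List.pyRange ((xs.length : Int) - 1) (-1) (-1)) := by
  have hlen : (((xs ++ [y]).length : Int)) - 1 = (xs.length : Int) := by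
    simp [List.length_append]
  rw [hlen, PySem.List.pyRange_neg_one_cons (by omega)]
  simp only [pvFindLoop, PySem.List.pyGet?_append_length]
  rw [if_neg (by exact hy)]
  exact pvFindLoop_restrict xs y _ (fun i hi => by
    rw [PySem.List.mem_pyRange_neg_one] at hi; omega)

lemma pvFindLoop_eq_neg_one_iff (xs : List String) :
    pvFindLoop xs (PySem.List.pyRange ((xs.length : Int) - 1) (-1) (-1)) = -1 ↔
      ∀ x ∈ xs, ¬ pvContent x := by
  induction xs using List.reverseRecOn with
  | nil =>
    rw [show ((([] : List String).length : Int)) - 1 = -1 by simp,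
        PySem.List.pyRange_neg_one_eq_nil le_rfl]
    simp [pvFindLoop]
  | append_singleton xs y ih =>
    by_cases hy : pvContent y
    · rw [pvFindLoop_concat_content xs y hy]
      constructor
      · intro h; exact absurd h (by omega)
      · intro h; exact absurd hy (h y (by simp))
    · rw [pvFindLoop_concat_noncontent xs y hy, ih]
      simp only [List.mem_append, List.mem_singleton]
      constructor
      · rintro h x hx
        rcases hx with hx | rfl
        · exact h x hx
        · exact hy
      · intro h x hx; exact h x (Or.inl hx)

lemma pvA_content (lines : List String) (t : Int) (h : lines ≠ [])
    (hf : pvFindLoop lines (PySem.List.pyRange ((lines.length : Int) - 1) (-1) (-1)) = t)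
    (ht : t ≠ -1) :
    ensure_correct_punctuation lines = (PySem.List.enumerate lines).map (pvGA t) := by
  unfold ensure_correct_punctuation
  rw [if_neg h]
  simp only [hf]
  rw [if_neg ht, pvA_foldl]
  simp

lemma pvMain (lines : List String) :
    ensure_correct_punctuation lines = ensure_correct_punctuation_alt lines := by
  induction lines using List.reverseRecOn with
  | nil => rfl
  | append_singleton xs y ih =>
    have hne : xs ++ [y] ≠ [] := by simp
    by_cases hy : pvContent y
    · -- y is the last content line
      have hf := pvFindLoop_concat_content xs y hy
      have hA := pvA_content (xs ++ [y]) (xs.length : Int) hne hf (by omega)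
      rw [hA, PySem.List.enumerate_append, List.map_append]
      rw [pvMap_pvGA xs 0 (xs.length : Int) (by intro i h1 h2; omega)]
      rw [PySem.List.enumerate_cons, PySem.List.enumerate_nil, List.map_cons, List.map_nil]
      simp only [zero_add]
      rw [pvGA_eq _ y hy]
      rw [pvB_unfold _ hne, List.reverse_append]
      simp only [List.reverse_cons, List.reverse_nil, List.nil_append, List.singleton_append]
      rw [show pvFound (y :: xs.reverse) false = true by
        simp [pvFound, pvStep_content y hy, pvFound_true]]
      simp only [Bool.true_eq_false, if_false]
      rw [show pvEmit (y :: xs.reverse) false = pvFix y :: pvEmit xs.reverse true by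
        simp [pvEmit, pvStep_content y hy]]
      rw [pvEmit_true, List.reverse_cons, List.map_reverse, List.reverse_reverse]
    · have hf := pvFindLoop_concat_noncontent xs y hy
      by_cases ht : pvFindLoop xs (PySem.List.pyRange ((xs.length : Int) - 1) (-1) (-1)) = -1
      · -- no content line at all: both return the input unchanged
        have hxs : ∀ x ∈ xs, ¬ pvContent x := (pvFindLoop_eq_neg_one_iff xs).mp ht
        have hA : ensure_correct_punctuation (xs ++ [y]) = xs ++ [y] := by
          unfold ensure_correct_punctuation
          rw [if_neg hne, hf, ht]
          simp
        have hB : ensure_correct_punctuation_alt (xs ++ [y]) = xs ++ [y] := by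
          rw [pvB_unfold _ hne, List.reverse_append]
          simp only [List.reverse_cons, List.reverse_nil, List.nil_append, List.singleton_append]
          rw [show pvFound (y :: xs.reverse) false = false by
            simp only [pvFound, pvStep_noncontent y hy]
            exact (pvFound_false_iff xs.reverse).mpr (by
              intro x hx; exact hxs x (List.mem_reverse.mp hx))]
          simp
        rw [hA, hB]
      · -- the last content line lies inside xs
        set t := pvFindLoop xs (PySem.List.pyRange ((xs.length : Int) - 1) (-1) (-1)) with htdef
        have hmem := pvFindLoop_mem xs (PySem.List.pyRange ((xs.length : Int) - 1) (-1) (-1))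
        rcases hmem with hmem | hmem
        · exact absurd hmem ht
        · rw [PySem.List.mem_pyRange_neg_one] at hmem
          have hxsne : xs ≠ [] := by
            intro hnil; rw [hnil] at hmem; simp at hmem; omega
          have hA := pvA_content (xs ++ [y]) t hne (by rw [hf]) ht
          have hAxs := pvA_content xs t hxsne rfl ht
          have hcont : ¬ ∀ x ∈ xs, ¬ pvContent x := fun hc =>
            ht ((pvFindLoop_eq_neg_one_iff xs).mpr hc)
          have hfound : pvFound xs.reverse false = true := by
            by_contra hb
            rw [Bool.not_eq_true] at hb
            exact hcont (fun x hx => (pvFound_false_iff xs.reverse).mp hb x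
              (List.mem_reverse.mpr hx))
          have hB : ensure_correct_punctuation_alt (xs ++ [y]) =
              ensure_correct_punctuation_alt xs ++ [y] := by
            rw [pvB_unfold _ hne, pvB_unfold _ hxsne, List.reverse_append]
            simp only [List.reverse_cons, List.reverse_nil, List.nil_append, List.singleton_append]
            rw [show pvEmit (y :: xs.reverse) false = y :: pvEmit xs.reverse false by
              simp [pvEmit, pvStep_noncontent y hy]]
            rw [show pvFound (y :: xs.reverse) false = pvFound xs.reverse false by
              simp [pvFound, pvStep_noncontent y hy]]
            rw [hfound]
            simp
          rw [hA, hB, ← ih, hAxs, PySem.List.enumerate_append]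
          rw [PySem.List.enumerate_cons, PySem.List.enumerate_nil]
          simp only [List.map_append, List.map_cons, List.map_nil, zero_add]
          rw [pvGA_ne t ((xs.length : Int), y) (by simp; omega)]
          rw [pvNorm_noncontent y hy]

-- ===== VERDICT (by name: the statement is the Claim_ definition above) =====
theorem ensure_correct_punctuation_spec : Claim_equal_ensure_correct_punctuation := by
  intro lines _
  unfold Spec_ensure_correct_punctuation
  exact pvMain lines
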